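-- pv_equiv track=rewrite | github.com/SvendDahlgaard/GitHub-Documentation | section_analyzer.py | create_section_index
-- ===== SOURCE A (Python) =====
-- from typing import List, Dict, Tuple
-- from collections import defaultdict
--
-- def create_section_index(sections: List[Tuple[str, Dict[str, str]]], analyses: Dict[str, str]) -> str:
--     """Create an index/directory of all analyzed sections with links."""
--     # Build a table of contents
--     toc_parts = ["# Repository Analysis Index\n\n"]
--     toc_parts.append("## Sections\n\n")
--
--     # Group sections by top-level directory
--     grouped_sections = defaultdict(list)
--     for section_name, _ in sections:
--         top_level = section_name.split('/')[0]
--         grouped_sections[top_level].append(section_name)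
--
--     # Add TOC entries for each group
--     for group, section_names in sorted(grouped_sections.items()):
--         toc_parts.append(f"### {group}\n\n")
--         for section_name in sorted(section_names):
--             # Get file count
--             _, files = next((s, f) for s, f in sections if s == section_name)
--             file_count = len(files)
--
--             # Create a sanitized anchor link
--             anchor = section_name.replace('/', '_').replace('.', '_').lower()
--             toc_parts.append(f"- [{section_name}](#{anchor}) ({file_count} files)\n")
--         toc_parts.append("\n")
--
--     # Add section analyses
--     toc_parts.append("## Analysis by Section\n\n")
--
--     for section_name, files in sections:
--         anchor = section_name.replace('/', '_').replace('.', '_').lower()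
--         toc_parts.append(f"<h3 id='{anchor}'>{section_name} ({len(files)} files)</h3>\n\n")
--
--         # List the files in this section
--         toc_parts.append("**Files:**\n\n")
--         for path in sorted(files.keys()):
--             toc_parts.append(f"- `{path}`\n")
--         toc_parts.append("\n")
--
--         # Add the analysis
--         if section_name in analyses:
--             toc_parts.append("**Analysis:**\n\n")
--             toc_parts.append(analyses[section_name])
--             toc_parts.append("\n\n---\n\n")
--         else:
--             toc_parts.append("*No analysis available for this section.*\n\n---\n\n")
--
--     return "".join(toc_parts)
-- ===== SOURCE B (Python) =====
-- def create_section_index(sections, analyses):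
--     """Create an index/directory of all analyzed sections with links."""
--     names = [s for s, _ in sections]
--     # first-occurrence file dict replaces A's per-name linear scan with next(...)
--     first_files = {}
--     for s, f in sections:
--         first_files.setdefault(s, f)
--
--     def top(n):
--         return n.split('/')[0]
--
--     def anchor(n):
--         return n.replace('/', '_').replace('.', '_').lower()
--
--     out = ["# Repository Analysis Index\n\n", "## Sections\n\n"]
--     # groups = sorted distinct top-level dirs; per group, filter + sort the names
--     for g in sorted({top(n) for n in names}):
--         bullets = "".join(
--             f"- [{n}](#{anchor(n)}) ({len(first_files[n])} files)\n"
--             for n in sorted(n for n in names if top(n) == g))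
--         out.append(f"### {g}\n\n{bullets}\n")
--
--     out.append("## Analysis by Section\n\n")
--
--     def render(s, files):
--         body = f"<h3 id='{anchor(s)}'>{s} ({len(files)} files)</h3>\n\n**Files:**\n\n"
--         body += "".join(f"- `{p}`\n" for p in sorted(files)) + "\n"
--         if s in analyses:
--             body += f"**Analysis:**\n\n{analyses[s]}\n\n---\n\n"
--         else:
--             body += "*No analysis available for this section.*\n\n---\n\n"
--         return body
--
--     out.append("".join(render(s, f) for s, f in sections))
--     return "".join(out)
-- ===== Notes on version B (the rewrite author's own statement) =====
-- stated objective: alternative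
-- what changed: The TOC phase replaces A's defaultdict bucket-building plus per-name linear next(...) scan for file counts with sorted distinct top-level directories, a per-group filtered-and-sorted name list, and a first-occurrence file dict built once with setdefault; the output is assembled by joining per-item strings instead of accumulating a parts list.
import Mathlib
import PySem

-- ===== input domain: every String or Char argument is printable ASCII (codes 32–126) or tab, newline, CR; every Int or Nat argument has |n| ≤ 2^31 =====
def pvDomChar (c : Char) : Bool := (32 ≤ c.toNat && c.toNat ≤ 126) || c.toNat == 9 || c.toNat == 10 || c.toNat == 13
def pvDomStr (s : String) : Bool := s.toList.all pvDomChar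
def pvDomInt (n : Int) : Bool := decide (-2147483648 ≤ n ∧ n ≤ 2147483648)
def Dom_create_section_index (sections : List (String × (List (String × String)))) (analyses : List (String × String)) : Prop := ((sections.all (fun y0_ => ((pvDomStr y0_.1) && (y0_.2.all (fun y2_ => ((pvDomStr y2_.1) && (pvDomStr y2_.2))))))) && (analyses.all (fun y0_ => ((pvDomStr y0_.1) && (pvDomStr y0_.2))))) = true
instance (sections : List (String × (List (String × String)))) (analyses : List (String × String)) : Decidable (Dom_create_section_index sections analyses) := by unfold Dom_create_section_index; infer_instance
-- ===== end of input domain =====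

-- B replaces A's defaultdict bucket-building and per-name linear `next(...)` scan by
-- sorted distinct top-level directories with a per-group filter and a first-occurrence
-- file dict, and assembles the output by joining per-item strings instead of an
-- accumulating parts list (alternative decomposition; return value is byte-identical).

-- shared helpers (both Pythons contain these exact expressions)
def pvTop (s : String) : String := ((PySem.Str.split? s "/").getD []).headD ""
def pvAnchor (s : String) : String :=
  PySem.Str.lower (PySem.Str.replace (PySem.Str.replace s "/" "_") "." "_")

-- ===== PORT A =====
-- grouped_sections: defaultdict(list); grouped[top].append(section_name)
def pvGroupedA (sections : List (String × (List (String × String)))) :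
    PySem.Dict String (List String) :=
  sections.foldl (fun d p => d.modify (pvTop p.1) [] (fun l => l ++ [p.1])) PySem.Dict.empty

-- the inner TOC loop body: append one bullet line to the accumulated string
def pvBulletLoopA (sections : List (String × (List (String × String))))
    (acc : String) (n : String) : String :=
  -- next((s, f) for s, f in sections if s == section_name): first match (n always occurs)
  acc ++ ("- [" ++ n ++ "](#" ++ pvAnchor n ++ ") (" ++
          PySem.Int.toStr (((match sections.find?
                               (fun (q : String × (List (String × String))) => q.1 == n) with
                             | some q => q.2 | none => []).length : Int)) ++ " files)\n")

-- one TOC group: header, bullets over sorted(section_names), trailing newline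
def pvTocLoopA (sections : List (String × (List (String × String))))
    (acc : String) (gp : String × List String) : String :=
  ((PySem.List.sorted gp.2 (fun x => x)).foldl (pvBulletLoopA sections)
      (acc ++ ("### " ++ gp.1 ++ "\n\n"))) ++ "\n"

-- one iteration of the 'Analysis by Section' loop: the successive appends of A's body
-- (h3, files header, sorted file bullets, blank line, analysis part), associativity-
-- normalised; 'if section_name in analyses: … analyses[section_name]' = first match
def pvSectionLoopA (analyses : List (String × String))
    (acc : String) (p : String × (List (String × String))) : String :=
  ((PySem.List.sorted (p.2.map (fun q => q.1)) (fun x => x)).foldl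
      (fun a pa => a ++ ("- `" ++ pa ++ "`\n"))
      (acc ++ ("<h3 id='" ++ pvAnchor p.1 ++ "'>" ++ p.1 ++ " (" ++
               PySem.Int.toStr (p.2.length : Int) ++ " files)</h3>\n\n" ++
               "**Files:**\n\n"))) ++
  ("\n" ++
   match analyses.find? (fun q => q.1 == p.1) with
   | some q => "**Analysis:**\n\n" ++ (q.2 ++ "\n\n---\n\n")
   | none => "*No analysis available for this section.*\n\n---\n\n")

-- sorted(grouped.items()): dict keys are distinct, so Python's pair comparison is
-- decided by the key alone; sorting by the key is exact here
def create_section_index (sections : List (String × (List (String × String))))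
    (analyses : List (String × String)) : String :=
  sections.foldl (pvSectionLoopA analyses)
    (((PySem.List.sorted (pvGroupedA sections).items (fun q => q.1)).foldl
        (pvTocLoopA sections)
        ("# Repository Analysis Index\n\n" ++ "## Sections\n\n")) ++
     "## Analysis by Section\n\n")

-- ===== PORT B =====
-- "".join(parts)
def pvConcat : List String → String
  | [] => ""
  | s :: t => s ++ pvConcat t

-- first_files.setdefault(s, f): keeps the FIRST occurrence of each section name
def pvFirstFilesB (sections : List (String × (List (String × String)))) :
    PySem.Dict String (List (String × String)) :=
  sections.foldl (fun d p => d.setdefault p.1 p.2) PySem.Dict.empty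

def pvBulletB (ff : PySem.Dict String (List (String × String))) (n : String) : String :=
  "- [" ++ n ++ "](#" ++ pvAnchor n ++ ") (" ++
  PySem.Int.toStr ((((ff.get? n).getD []).length : Int)) ++ " files)\n"

def pvGroupB (names : List String) (ff : PySem.Dict String (List (String × String)))
    (g : String) : String :=
  "### " ++ g ++ "\n\n" ++
  (pvConcat ((PySem.List.sorted (names.filter (fun n => pvTop n == g)) (fun x => x)).map
      (pvBulletB ff)) ++ "\n")

def pvRenderB (analyses : List (String × String))
    (p : String × (List (String × String))) : String :=
  "<h3 id='" ++ pvAnchor p.1 ++ "'>" ++ p.1 ++ " (" ++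
  PySem.Int.toStr (p.2.length : Int) ++ " files)</h3>\n\n**Files:**\n\n" ++
  (
   (pvConcat ((PySem.List.sorted (p.2.map (fun q => q.1)) (fun x => x)).map
       (fun pa => "- `" ++ pa ++ "`\n")) ++
    ("\n" ++
     match analyses.find? (fun q => q.1 == p.1) with
     | some q => "**Analysis:**\n\n" ++ (q.2 ++ "\n\n---\n\n")
     | none => "*No analysis available for this section.*\n\n---\n\n")))

-- sorted({top(n) for n in names}): the distinct top-level dirs, in sorted order
def create_section_index_alt (sections : List (String × (List (String × String))))
    (analyses : List (String × String)) : String :=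
  ("# Repository Analysis Index\n\n" ++ "## Sections\n\n") ++
  ((pvConcat ((PySem.List.sorted (PySem.Set.ofList ((sections.map (fun p => p.1)).map pvTop))
                 (fun x => x)).map
       (pvGroupB (sections.map (fun p => p.1)) (pvFirstFilesB sections))) ++
    ("## Analysis by Section\n\n" ++ pvConcat (sections.map (pvRenderB analyses)))))

-- ===== PRECONDITION & SPEC =====
def Spec_create_section_index (sections : List (String × (List (String × String)))) (analyses : List (String × String)) (out : String) : Prop := out = create_section_index_alt sections analyses
instance (sections : List (String × (List (String × String)))) (analyses : List (String × String)) (out : String) : Decidable (Spec_create_section_index sections analyses out) := by unfold Spec_create_section_index; infer_instance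

-- ===== CLAIM (what is proved, stated in full; the proofs are below) =====
def Claim_equal_create_section_index : Prop := ∀ (sections : List (String × (List (String × String)))) (analyses : List (String × String)), Dom_create_section_index sections analyses → Spec_create_section_index sections analyses (create_section_index sections analyses)

-- ===== LEMMAS AND PROOFS =====

-- a fold that appends one string per element is the initial string ++ the joined parts
theorem pv_foldl_append_concat {α : Type} (g : String → α → String) (f : α → String)
    (h : ∀ a x, g a x = a ++ f x) :
    ∀ (l : List α) (s : String), l.foldl g s = s ++ pvConcat (l.map f) := by
  intro l
  induction l with
  | nil => intro s; simp [pvConcat]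
  | cons x t ih =>
      intro s
      simp only [List.foldl_cons, List.map_cons, pvConcat, ih, h]
      rw [String.append_assoc]

-- the setdefault fold is a first-match lookup
theorem pv_get?_foldl_setdefault (l : List (String × (List (String × String)))) (n : String) :
    ∀ (d : PySem.Dict String (List (String × String))),
      (l.foldl (fun d p => d.setdefault p.1 p.2) d).get? n =
      (d.get? n).or ((l.find? (fun p => p.1 == n)).map (fun p => p.2)) := by
  induction l with
  | nil => intro d; simp
  | cons x t ih =>
      intro d
      rw [List.foldl_cons, ih]
      by_cases hx : x.1 = n
      · subst hx
        rw [PySem.Dict.get?_setdefault_self, List.find?_cons_of_pos (by simp)]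
        cases d.get? x.1 <;> simp
      · rw [PySem.Dict.get?_setdefault_of_ne _ _ (fun he => hx he.symm),
            List.find?_cons_of_neg (by simp [hx])]

theorem pv_firstFiles_get? (sections : List (String × (List (String × String)))) (n : String) :
    (pvFirstFilesB sections).get? n =
      (sections.find? (fun p => p.1 == n)).map (fun p => p.2) := by
  unfold pvFirstFilesB
  rw [pv_get?_foldl_setdefault]
  simp

-- A's bullet step appends exactly B's bullet string
theorem pv_bullet_eq (sections : List (String × (List (String × String))))
    (acc n : String) :
    pvBulletLoopA sections acc n = acc ++ pvBulletB (pvFirstFilesB sections) n := by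
  unfold pvBulletLoopA pvBulletB
  rw [pv_firstFiles_get?]
  cases h : sections.find? (fun q => q.1 == n) <;> simp

-- the distinct top-level directories, in first-occurrence order
def pvTops (sections : List (String × (List (String × String)))) : List String :=
  PySem.Set.ofList (sections.map (fun p => pvTop p.1))

theorem pv_grouped_getD (sections : List (String × (List (String × String)))) :
    ∀ (d : PySem.Dict String (List String)) (k : String),
      (sections.foldl (fun d p => d.modify (pvTop p.1) [] (fun l => l ++ [p.1])) d).getD k [] =
        d.getD k [] ++ (sections.filter (fun p => pvTop p.1 == k)).map (fun p => p.1) := by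
  induction sections with
  | nil => intro d k; simp
  | cons x t ih =>
      intro d k
      rw [List.foldl_cons, ih]
      by_cases hx : pvTop x.1 = k
      · subst hx
        simp
      · simp [PySem.Dict.getD_modify, hx, Ne.symm hx]

theorem pv_grouped_keys (sections : List (String × (List (String × String)))) :
    (pvGroupedA sections).keys = pvTops sections := by
  unfold pvGroupedA pvTops
  have := PySem.Dict.keys_foldl_modify_key sections (fun p => pvTop p.1) []
      (fun _ p => fun l => l ++ [p.1]) PySem.Dict.empty
  simpa [PySem.Set.update_nil_left] using this

theorem pv_grouped_items (sections : List (String × (List (String × String)))) :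
    (pvGroupedA sections).items = (pvTops sections).map
      (fun k => (k, (sections.filter (fun p => pvTop p.1 == k)).map (fun p => p.1))) := by
  have hnd : (pvGroupedA sections).keys.Nodup := by
    unfold pvGroupedA
    exact PySem.Dict.nodup_keys_foldl_modify_key sections (fun p => pvTop p.1) []
      (fun _ p => fun l => l ++ [p.1]) PySem.Dict.empty (by simp)
  rw [PySem.Dict.items_eq_map_keys _ hnd [], pv_grouped_keys]
  refine List.map_congr_left fun k _ => ?_
  have := pv_grouped_getD sections PySem.Dict.empty k
  unfold pvGroupedA
  rw [this]
  simp

theorem pv_sorted_items (sections : List (String × (List (String × String)))) :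
    PySem.List.sorted (pvGroupedA sections).items (fun q => q.1) =
      (PySem.List.sorted (pvTops sections) (fun x => x)).map
        (fun k => (k, (sections.filter (fun p => pvTop p.1 == k)).map (fun p => p.1))) := by
  rw [pv_grouped_items]
  apply PySem.List.sorted_eq_of_perm_of_pairwise_lt
  · exact (PySem.List.sorted_perm _ _ _).map _
  · have h := PySem.List.sorted_ofList_pairwise_lt (sections.map (fun p => pvTop p.1))
    exact List.Pairwise.map _ (fun a b hab => hab) h

-- the per-group bucket A sorts is exactly the filtered name list B sorts
theorem pv_bucket_eq (sections : List (String × (List (String × String)))) (k : String) :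
    (sections.filter (fun p => pvTop p.1 == k)).map (fun p => p.1) =
      (sections.map (fun p => p.1)).filter (fun n => pvTop n == k) := by
  rw [List.filter_map]
  rfl

theorem pv_tocgroup_eq (sections : List (String × (List (String × String))))
    (acc : String) (k : String) :
    pvTocLoopA sections acc
        (k, (sections.filter (fun p => pvTop p.1 == k)).map (fun p => p.1)) =
      acc ++ pvGroupB (sections.map (fun p => p.1)) (pvFirstFilesB sections) k := by
  unfold pvTocLoopA pvGroupB
  rw [pv_foldl_append_concat (pvBulletLoopA sections) (pvBulletB (pvFirstFilesB sections))
      (pv_bullet_eq sections)]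
  rw [pv_bucket_eq]
  simp [String.append_assoc]

theorem pv_section_eq (analyses : List (String × String)) (acc : String)
    (p : String × (List (String × String))) :
    pvSectionLoopA analyses acc p = acc ++ pvRenderB analyses p := by
  unfold pvSectionLoopA pvRenderB
  rw [pv_foldl_append_concat (fun a pa => a ++ ("- `" ++ pa ++ "`\n"))
      (fun pa => "- `" ++ pa ++ "`\n") (fun _ _ => rfl)]
  cases h : analyses.find? (fun q => q.1 == p.1) <;> simp [String.append_assoc]

-- ===== VERDICT (by name: the statement is the Claim_ definition above) =====
set_option maxHeartbeats 1000000 in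
theorem create_section_index_spec : Claim_equal_create_section_index := by
  intro sections analyses _
  unfold Spec_create_section_index create_section_index create_section_index_alt
  have hX : (sections.map (fun p => p.1)).map pvTop = sections.map (fun p => pvTop p.1) := by
    simp
  have h2 := pv_foldl_append_concat
      (fun (x : String) (k : String) => pvTocLoopA sections x
        (k, (sections.filter (fun p => pvTop p.1 == k)).map (fun p => p.1)))
      (pvGroupB (sections.map (fun p => p.1)) (pvFirstFilesB sections))
      (fun acc k => pv_tocgroup_eq sections acc k)
      (PySem.List.sorted (pvTops sections) (fun x => x))
      ("# Repository Analysis Index\n\n" ++ "## Sections\n\n")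
  have h3 := pv_foldl_append_concat (pvSectionLoopA analyses) (pvRenderB analyses)
      (pv_section_eq analyses) sections
  rw [pv_sorted_items]
  simp only [List.foldl_map]
  rw [h2, h3]
  unfold pvTops
  rw [← hX]
  simp only [String.append_assoc]
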